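-- pv_equiv track=rewrite | github.com/QUESTION-CODE-SOLUTION/Gitsetcode | Data science & ML/Day1/Assignment folder/code2.py | find_lexicographically_smallest
-- ===== SOURCE A (Python) =====
-- def find_lexicographically_smallest(S):
--     N = len(S)
--     current_position = 0
--
--     while current_position < N - 2:
--         if S[current_position] == '0' and S[current_position + 1] == '0' and S[current_position + 2] == '1':
--             S = S[:current_position] + '100' + S[current_position + 3:]
--             current_position += 2
--         else:
--             current_position += 1
--
--     return S
-- ===== SOURCE B (Python) =====
-- def find_lexicographically_smallest(S):
--     # One pass: consume the string from the front, emitting output as we go.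
--     # A leading "001" becomes "10" with a '0' pushed back (it may combine with
--     # the following characters into another "001"); any other leading character
--     # is final and moves straight to the output.
--     out = []
--     rest = S
--     while len(rest) >= 3:
--         if rest.startswith('001'):
--             out.append('10')
--             rest = '0' + rest[3:]
--         else:
--             out.append(rest[0])
--             rest = rest[1:]
--     return ''.join(out) + rest
-- ===== Notes on version B (the rewrite author's own statement) =====
-- stated objective: alternative
-- what changed: Instead of repeatedly splicing '100' back into the string and rescanning, B consumes the string from the front in one pass, emitting '10' and pushing a single '0' back whenever the remainder starts with '001', and otherwise moving the first character straight to the output.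
import Mathlib
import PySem

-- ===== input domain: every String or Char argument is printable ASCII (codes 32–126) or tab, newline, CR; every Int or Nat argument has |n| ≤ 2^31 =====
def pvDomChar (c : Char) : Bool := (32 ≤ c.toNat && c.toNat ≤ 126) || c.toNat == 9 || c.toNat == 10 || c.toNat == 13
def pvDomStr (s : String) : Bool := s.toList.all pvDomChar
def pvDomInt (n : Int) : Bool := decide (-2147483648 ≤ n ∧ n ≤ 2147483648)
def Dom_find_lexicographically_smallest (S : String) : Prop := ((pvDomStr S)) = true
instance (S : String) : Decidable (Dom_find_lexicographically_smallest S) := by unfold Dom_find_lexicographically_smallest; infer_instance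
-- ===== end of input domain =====

-- B replaces A's repeated in-place '001'->'100' string rewriting by a single
-- front-to-back consuming pass that emits the output as it goes (alternative).

-- ===== PORT A =====
-- A's while loop over state (S, current_position); N = len(S) never changes (the
-- replacement swaps 3 chars for 3), so it is passed along unchanged.  The fuel
-- argument only makes the recursion structural: cp grows by ≥ 1 per iteration, so
-- fuel = N ≥ N - cp iterations is never exhausted (proved in pvALoop_eq below).
def pvALoop (fuel : Nat) (S : List Char) (cp N : Nat) : List Char :=
  match fuel with
  | 0 => S
  | fuel + 1 =>
    if cp < N - 2 then
      if PySem.List.pyGet? S (cp : Int) = some '0' ∧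
         PySem.List.pyGet? S ((cp + 1 : Nat) : Int) = some '0' ∧
         PySem.List.pyGet? S ((cp + 2 : Nat) : Int) = some '1' then
        pvALoop fuel (PySem.List.slice S none (some (cp : Int)) ++ ['1', '0', '0'] ++
                 PySem.List.slice S (some ((cp + 3 : Nat) : Int)) none) (cp + 2) N
      else
        pvALoop fuel S (cp + 1) N
    else S

def find_lexicographically_smallest (S : String) : String :=
  String.ofList (pvALoop S.toList.length S.toList 0 S.toList.length)

-- ===== PORT B =====
-- Source B's while loop over state (out, rest): a leading "001" becomes "10" with a
-- '0' pushed back onto rest, any other leading char moves to the output.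
-- Terminates because |rest| drops by 2 (match) or 1 (otherwise) each iteration.
def pvBLoop (out : List Char) (rest : List Char) : List Char :=
  if rest.length ≥ 3 then
    if PySem.Chars.startswith rest ['0', '0', '1'] then
      pvBLoop (out ++ ['1', '0']) ('0' :: rest.drop 3)
    else
      pvBLoop (out ++ rest.take 1) (rest.drop 1)
  else out ++ rest
termination_by rest.length
decreasing_by all_goals (simp; omega)

def find_lexicographically_smallest_alt (S : String) : String :=
  String.ofList (pvBLoop [] S.toList)

-- ===== PRECONDITION & SPEC =====
def Spec_find_lexicographically_smallest (S : String) (out : String) : Prop := out = find_lexicographically_smallest_alt S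
instance (S : String) (out : String) : Decidable (Spec_find_lexicographically_smallest S out) := by unfold Spec_find_lexicographically_smallest; infer_instance

-- ===== CLAIM (what is proved, stated in full; the proofs are below) =====
def Claim_equal_find_lexicographically_smallest : Prop := ∀ (S : String), Dom_find_lexicographically_smallest S → Spec_find_lexicographically_smallest S (find_lexicographically_smallest S)

-- ===== LEMMAS AND PROOFS =====

-- Common normal form of both loops: scan left to right while ≥ 3 chars remain,
-- turning a leading "001" into "10" + a carried '0', else committing the head.
def pvG (l : List Char) : List Char :=
  match l with
  | a :: b :: c :: rest =>
    if a = '0' ∧ b = '0' ∧ c = '1' then '1' :: '0' :: pvG ('0' :: rest)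
    else a :: pvG (b :: c :: rest)
  | l => l
termination_by l.length
decreasing_by all_goals (simp_all; try omega)

theorem pvG_short (l : List Char) (h : l.length ≤ 2) : pvG l = l := by
  match l with
  | [] => simp [pvG]
  | [a] => simp [pvG]
  | [a, b] => simp [pvG]
  | a :: b :: c :: rest => simp at h

-- B's loop computes out ++ pvG rest.
theorem pvBLoop_eq (rest out : List Char) : pvBLoop out rest = out ++ pvG rest := by
  induction rest using pvG.induct generalizing out with
  | case1 a b c t hm ih =>
    rw [pvBLoop]
    have hsw : PySem.Chars.startswith (a :: b :: c :: t) ['0', '0', '1'] = true := by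
      rw [PySem.Chars.startswith_iff]
      obtain ⟨ha, hb, hc⟩ := hm
      subst ha hb hc
      exact ⟨t, rfl⟩
    rw [if_pos (by simp), if_pos hsw]
    simp only [List.drop_succ_cons, List.drop_zero]
    rw [pvG, if_pos hm, ih]
    simp
  | case2 a b c t hm ih =>
    rw [pvBLoop]
    have hsw : PySem.Chars.startswith (a :: b :: c :: t) ['0', '0', '1'] = false := by
      rw [Bool.eq_false_iff]
      intro h
      rw [PySem.Chars.startswith_iff] at h
      obtain ⟨s, hs⟩ := h
      simp [List.cons.injEq] at hs
      exact hm ⟨hs.1.symm, hs.2.1.symm, hs.2.2.1.symm⟩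
    rw [if_pos (by simp), hsw]
    simp only [Bool.false_eq_true, if_false, List.take_succ_cons, List.take_zero,
      List.drop_succ_cons, List.drop_zero]
    rw [pvG, if_neg hm, ih]
    simp
  | case3 l hl =>
    have : l.length ≤ 2 := by
      match l, hl with
      | [], _ => simp
      | [a], _ => simp
      | [a, b], _ => simp
      | a :: b :: c :: t, hl => exact absurd rfl (hl a b c t)
    rw [pvBLoop, if_neg (by omega), pvG_short l this]

-- A's loop computes the committed prefix ++ pvG of the rest.
theorem pvALoop_eq (fuel : Nat) (S : List Char) (cp : Nat)
    (hk : S.length - cp ≤ fuel) (hcp : cp ≤ S.length) :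
    pvALoop fuel S cp S.length = S.take cp ++ pvG (S.drop cp) := by
  induction fuel generalizing S cp with
  | zero =>
    have hcp' : cp = S.length := by omega
    rw [pvALoop, List.drop_of_length_le (by omega), pvG_short _ (by simp),
        List.take_of_length_le (by omega)]
    simp
  | succ fuel ih =>
    rw [pvALoop]
    by_cases hlt : cp < S.length - 2
    · rw [if_pos hlt]
      have hb0 : cp < S.length := by omega
      have hb1 : cp + 1 < S.length := by omega
      have hb2 : cp + 2 < S.length := by omega
      have hd : S.drop cp = S[cp] :: S[cp + 1] :: S[cp + 2] :: S.drop (cp + 3) := by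
        rw [List.drop_eq_getElem_cons hb0, List.drop_eq_getElem_cons hb1,
            List.drop_eq_getElem_cons hb2]
      have hcond : (PySem.List.pyGet? S (cp : Int) = some '0' ∧
          PySem.List.pyGet? S ((cp + 1 : Nat) : Int) = some '0' ∧
          PySem.List.pyGet? S ((cp + 2 : Nat) : Int) = some '1') ↔
          (S[cp] = '0' ∧ S[cp + 1] = '0' ∧ S[cp + 2] = '1') := by
        rw [PySem.List.pyGet?_natCast, PySem.List.pyGet?_natCast, PySem.List.pyGet?_natCast,
            List.getElem?_eq_getElem hb0, List.getElem?_eq_getElem hb1, List.getElem?_eq_getElem hb2]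
        simp
      by_cases hm : S[cp] = '0' ∧ S[cp + 1] = '0' ∧ S[cp + 2] = '1'
      · rw [if_pos (hcond.mpr hm)]
        rw [PySem.List.slice_to_natCast, PySem.List.slice_from_natCast]
        set S' := S.take cp ++ ['1', '0', '0'] ++ S.drop (cp + 3) with hS'
        have hlen : S'.length = S.length := by
          simp [hS']; omega
        have htk : (S.take cp).length = cp := by simp; omega
        have ihcall : pvALoop fuel S' (cp + 2) S.length = S'.take (cp + 2) ++ pvG (S'.drop (cp + 2)) := by
          rw [← hlen]
          exact ih S' (cp + 2) (by omega) (by omega)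
        rw [ihcall]
        have htake : S'.take (cp + 2) = S.take cp ++ ['1', '0'] := by
          rw [hS', List.append_assoc, List.take_append, htk,
              List.take_of_length_le (by omega), show cp + 2 - cp = 2 by omega]
          rfl
        have hdrop : S'.drop (cp + 2) = '0' :: S.drop (cp + 3) := by
          rw [hS', List.append_assoc, List.drop_append, htk,
              List.drop_eq_nil_of_le (by omega), show cp + 2 - cp = 2 by omega]
          rfl
        rw [htake, hdrop, hd, hm.1, hm.2.1, hm.2.2]
        rw [pvG, if_pos (by exact ⟨rfl, rfl, rfl⟩)]
        simp
      · rw [if_neg (fun h => hm (hcond.mp h))]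
        rw [ih S (cp + 1) (by omega) (by omega)]
        have hd1 : S.drop (cp + 1) = S[cp + 1] :: S[cp + 2] :: S.drop (cp + 3) := by
          rw [List.drop_eq_getElem_cons hb1, List.drop_eq_getElem_cons hb2]
        have htake1 : S.take (cp + 1) = S.take cp ++ [S[cp]] := by
          rw [List.take_add_one, List.getElem?_eq_getElem hb0]
          rfl
        have hng : pvG (S[cp] :: S[cp + 1] :: S[cp + 2] :: S.drop (cp + 3)) =
            S[cp] :: pvG (S[cp + 1] :: S[cp + 2] :: S.drop (cp + 3)) := by
          rw [pvG, if_neg hm]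
        rw [hd, hng, ← hd1, htake1, List.append_assoc]
        rfl
    · rw [if_neg hlt]
      rw [pvG_short _ (by simp; omega)]
      simp

-- ===== VERDICT (by name: the statement is the Claim_ definition above) =====
theorem find_lexicographically_smallest_spec : Claim_equal_find_lexicographically_smallest := by
  intro S _
  unfold Spec_find_lexicographically_smallest
  unfold find_lexicographically_smallest find_lexicographically_smallest_alt
  rw [pvALoop_eq S.toList.length S.toList 0 (by omega) (by omega), pvBLoop_eq]
  simp
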